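-- pv_equiv track=rewrite | github.com/darren-huang/leetcode-grind | hackerrank_comps/moodys_analytics_women_eng_2018/2.alg_trading_profits.py | solve
-- ===== SOURCE A (Python) =====
-- from collections import defaultdict
--
-- def solve(profits):
--     dp_dict = {(None, None): 0}  # (alg-2, alg-1): profit
--     for algs in profits:
--         next_dp_lists = defaultdict(list)
--         for (alg_m_2, alg_m_1), c_profit in dp_dict.items():
--             for alg_num in range(len(algs)):
--                 if alg_m_2 == alg_num or alg_m_1 == alg_num:
--                     continue
--                 next_dp_lists[(alg_m_1, alg_num)].append(c_profit + algs[alg_num])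
--         dp_dict = {key: max(val) for key, val in next_dp_lists.items()}
--     return max(dp_dict.values())
-- ===== SOURCE B (Python) =====
-- def solve(profits):
--     # O(n*k^2): per round, keep for each last-alg b the best and second-best
--     # (by distinct previous alg a) predecessor profits, so each transition is O(1).
--     dp = {(None, None): 0}  # (alg-2, alg-1): profit
--     for algs in profits:
--         k = len(algs)
--         best = {}  # b -> (v1, a1, v2): top value, its alg-2, top value among other alg-2s
--         for (a, b), v in dp.items():
--             if b not in best:
--                 best[b] = (v, a, None)
--             else:
--                 v1, a1, v2 = best[b]
--                 if v > v1:
--                     best[b] = (v, a, v1)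
--                 else:
--                     best[b] = (v1, a1, v if (v2 is None or v > v2) else v2)
--         dp = {}
--         for b, (v1, a1, v2) in best.items():
--             for c in range(k):
--                 if b == c:
--                     continue
--                 if a1 == c:
--                     if v2 is not None:
--                         dp[(b, c)] = v2 + algs[c]
--                 else:
--                     dp[(b, c)] = v1 + algs[c]
--     return max(dp.values())
-- ===== Notes on version B (the rewrite author's own statement) =====
-- stated objective: faster
-- what changed: A's transition scans every predecessor DP state for each new state (O(k) work per (state, alg) pair, building lists and taking max); B instead precomputes, per last-alg b, the best and second-best predecessor values keyed by distinct alg-2, making each transition O(1), so a round costs O(k^2) instead of O(k^3).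
import Mathlib
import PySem

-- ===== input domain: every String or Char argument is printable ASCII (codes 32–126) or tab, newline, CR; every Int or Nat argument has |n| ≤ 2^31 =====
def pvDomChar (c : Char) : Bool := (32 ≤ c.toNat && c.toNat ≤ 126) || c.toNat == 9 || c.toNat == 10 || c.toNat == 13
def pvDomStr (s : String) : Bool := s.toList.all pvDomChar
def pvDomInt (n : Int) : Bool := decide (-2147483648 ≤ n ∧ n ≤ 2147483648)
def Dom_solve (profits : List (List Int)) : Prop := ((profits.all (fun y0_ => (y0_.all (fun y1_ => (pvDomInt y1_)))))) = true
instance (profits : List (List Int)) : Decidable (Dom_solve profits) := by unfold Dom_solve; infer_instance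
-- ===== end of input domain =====

-- B precomputes, per last alg b, the top-2 predecessor values (keyed by distinct alg-2),
-- so each DP transition is O(1) instead of a scan over all predecessor states (measured faster).

-- max(xs) for Int lists; only applied to non-empty lists inside Pre_, so the default is never used
def pyMaxInt (l : List Int) : Int := (PySem.List.max? l (fun x => x)).getD 0

-- ===== PORT A =====
def solve (profits : List (List Int)) : Int :=
  let dpN := profits.foldl (fun dp algs =>
    let nxt := dp.items.foldl (fun nxt it =>
      (PySem.List.pyRange 0 (algs.length : Int) 1).foldl (fun nxt c =>
        if it.1.1 == some c || it.1.2 == some c then nxt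
        else nxt.modify (it.1.2, some c) [] (fun x => x ++ [it.2 + PySem.List.pyGetD algs c 0]))
        nxt)
      (PySem.Dict.empty : PySem.Dict (Option Int × Option Int) (List Int))
    PySem.Dict.ofList (nxt.items.map (fun kv => (kv.1, pyMaxInt kv.2))))
    (PySem.Dict.ofList [(((none : Option Int), (none : Option Int)), (0 : Int))])
  pyMaxInt dpN.values  -- final max() raises on an empty dict: such inputs are outside Pre_solve

-- ===== PORT B =====
def solve_alt (profits : List (List Int)) : Int :=
  let dpN := profits.foldl (fun dp algs =>
    -- pass 1: for each last alg b, the best predecessor value v1 (with its alg-2 a1)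
    -- and the best value v2 among predecessors whose alg-2 differs from a1
    let best := dp.items.foldl (fun best it =>
      match best.get? it.1.2 with
      | none => best.insert it.1.2 (it.2, it.1.1, (none : Option Int))
      | some (v1, a1, v2) =>
        if v1 < it.2 then best.insert it.1.2 (it.2, it.1.1, some v1)
        else best.insert it.1.2 (v1, a1, some (match v2 with
          | none => it.2
          | some w => if w < it.2 then it.2 else w)))
      (PySem.Dict.empty : PySem.Dict (Option Int) (Int × Option Int × Option Int))
    -- pass 2: O(1) transition per new state (b, c)
    best.items.foldl (fun ndp bt =>
      (PySem.List.pyRange 0 (algs.length : Int) 1).foldl (fun ndp c =>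
        if bt.1 == some c then ndp
        else if bt.2.2.1 == some c then
          match bt.2.2.2 with
          | some v2 => ndp.insert (bt.1, some c) (v2 + PySem.List.pyGetD algs c 0)
          | none => ndp
        else ndp.insert (bt.1, some c) (bt.2.1 + PySem.List.pyGetD algs c 0))
        ndp)
      (PySem.Dict.empty : PySem.Dict (Option Int × Option Int) Int))
    (PySem.Dict.ofList [(((none : Option Int), (none : Option Int)), (0 : Int))])
  pyMaxInt dpN.values

-- ===== PRECONDITION & SPEC =====
-- A (and B identically) raises ValueError exactly when no feasible schedule exists — no way to
-- pick one algorithm per round, each differing from the two previously picked — which empties the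
-- DP dict before the final max(); Pre_solve states, over the row lengths only, that a feasible
-- schedule exists, so it excludes exactly the inputs on which A raises and no input on which A returns.
def feasibleSched : Option Nat → Option Nat → List Nat → Bool
  | _, _, [] => true
  | a, b, k :: rest =>
      (List.range k).any (fun c => some c != a && some c != b && feasibleSched b (some c) rest)

def Pre_solve (profits : List (List Int)) : Prop :=
  feasibleSched none none (profits.map List.length) = true
instance (profits : List (List Int)) : Decidable (Pre_solve profits) := by
  unfold Pre_solve; infer_instance

def pvWitness_solve : List (List Int) := [[1, 2, 3], [4, 5, 6]]

def Spec_solve (profits : List (List Int)) (out : Int) : Prop := out = solve_alt profits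
instance (profits : List (List Int)) (out : Int) : Decidable (Spec_solve profits out) := by
  unfold Spec_solve; infer_instance

-- ===== CLAIM (what is proved, stated in full; the proofs are below) =====
def Claim_equal_solve : Prop := ∀ (profits : List (List Int)), Dom_solve profits → Pre_solve profits → Spec_solve profits (solve profits)

-- ===== LEMMAS AND PROOFS =====

lemma foldl_match_filterMap {α β γ : Type} (l : List β) (h : β → Option γ) (g : α → γ → α) (acc : α) :
    l.foldl (fun a x => match h x with | some y => g a y | none => a) acc
      = (l.filterMap h).foldl g acc := by
  induction l generalizing acc with
  | nil => rfl
  | cons x t ih => simp only [List.foldl_cons, List.filterMap_cons]; cases h x <;> simp [ih]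

lemma foldl_foldl_flatMap {α β γ : Type} (l : List β) (f : β → List γ) (g : α → γ → α) (acc : α) :
    l.foldl (fun a x => (f x).foldl g a) acc = (l.flatMap f).foldl g acc := by
  induction l generalizing acc with
  | nil => rfl
  | cons x t ih => simp only [List.foldl_cons, List.flatMap_cons, List.foldl_append]; exact ih _

lemma filterMap_eq_single {α β : Type} [DecidableEq α] (l : List α) (hl : l.Nodup) (g : α → Option β) (c : α)
    (hg : ∀ x, g x ≠ none → x = c) : l.filterMap g = if c ∈ l then (g c).toList else [] := by
  induction l with
  | nil => simp
  | cons x t ih =>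
    rcases List.nodup_cons.1 hl with ⟨hx, ht⟩
    by_cases hxc : x = c
    · subst hxc
      have : t.filterMap g = [] := by
        apply List.filterMap_eq_nil_iff.2
        intro a ha
        cases hga : g a with
        | none => rfl
        | some y => exact absurd (hg a (by simp [hga])) (fun h => hx (h ▸ ha))
      simp [List.filterMap_cons, this]
      cases g x <;> simp
    · have hgx : g x = none := by
        by_contra h; exact hxc (hg x h)
      have hcx : ¬ c = x := fun h => hxc h.symm
      simp [hgx, ih ht, hcx]

lemma flatMap_if_singleton {α β : Type} (l : List α) (p : α → Bool) (f : α → β) :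
    l.flatMap (fun x => if p x then [f x] else []) = (l.filter p).map f := by
  induction l with
  | nil => rfl
  | cons x t ih => by_cases h : p x <;> simp [h, ih]

lemma filter_flatMap' {α β : Type} (l : List α) (f : α → List β) (p : β → Bool) :
    (l.flatMap f).filter p = l.flatMap (fun x => (f x).filter p) := by
  induction l with
  | nil => rfl
  | cons x t ih => simp [List.filter_append, ih]

lemma foldl_max_map_add (t : List Int) (a x : Int) :
    (t.map (· + x)).foldl max (a + x) = t.foldl max a + x := by
  induction t generalizing a with
  | nil => rfl
  | cons y t ih =>
    simp only [List.map_cons, List.foldl_cons]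
    rw [max_add_add_right]
    exact ih _

lemma max?_id_eq_some {l : List Int} {m : Int} (hm : m ∈ l) (hle : ∀ y ∈ l, y ≤ m) :
    PySem.List.max? l (fun y => y) = some m := by
  cases l with
  | nil => exact absurd hm (by simp)
  | cons x t =>
    rw [PySem.List.max?_id_cons]
    congr 1
    apply le_antisymm
    · rcases PySem.List.foldl_max_mem t x with h | h
      · rw [h]; exact hle x (by simp)
      · exact hle _ (List.mem_cons_of_mem _ h)
    · rcases List.mem_cons.1 hm with rfl | h
      · exact (PySem.List.le_foldl_max t m).1
      · exact (PySem.List.le_foldl_max t x).2 m h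

lemma max?_id_perm {l l' : List Int} (h : l.Perm l') :
    PySem.List.max? l (fun y => y) = PySem.List.max? l' (fun y => y) := by
  cases hm : PySem.List.max? l (fun y => y) with
  | none =>
    rw [PySem.List.max?_eq_none_iff] at hm
    subst hm
    rw [(PySem.List.max?_eq_none_iff _ _).2 h.nil_eq.symm]  -- l' = []
  | some m =>
    have h1 := PySem.List.max?_mem hm
    have h2 := PySem.List.max?_isMax hm
    exact (max?_id_eq_some (h.mem_iff.1 h1) (fun y hy => h2 y (h.mem_iff.2 hy))).symm

lemma max?_id_append_singleton (l : List Int) (v : Int) :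
    PySem.List.max? (l ++ [v]) (fun y => y)
      = some (match PySem.List.max? l (fun y => y) with | none => v | some w => max w v) := by
  cases l with
  | nil =>
    rw [show (PySem.List.max? ([] : List Int) (fun y => y)) = none from rfl]
    simp [PySem.List.max?_id_cons]
  | cons x t =>
    simp only [List.cons_append, PySem.List.max?_id_cons, List.foldl_append, List.foldl_cons,
      List.foldl_nil]

lemma max?_map_add (l : List Int) (x : Int) :
    PySem.List.max? (l.map (· + x)) (fun y => y)
      = (PySem.List.max? l (fun y => y)).map (· + x) := by
  cases l with
  | nil => rfl
  | cons y t => simp [PySem.List.max?_id_cons, foldl_max_map_add]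

lemma dict_get?_eq_find? {κ ν : Type} [BEq κ] [LawfulBEq κ] (d : PySem.Dict κ ν) (hnd : d.keys.Nodup) (k : κ) :
    d.get? k = (d.items.find? (fun q => q.1 == k)).map Prod.snd := by
  cases hf : d.items.find? (fun q => q.1 == k) with
  | none =>
    rw [List.find?_eq_none] at hf
    have : k ∉ d.keys := by
      intro hk
      rcases List.mem_map.1 hk with ⟨q, hq, hq1⟩
      exact hf q hq (by simp [hq1])
    simp [(PySem.Dict.get?_eq_none_iff_not_mem_keys d k).2 this]
  | some q =>
    have hq1 : q.1 = k := by
      have := List.find?_some hf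
      simpa using this
    have hmem : q ∈ d.items := List.mem_of_find?_eq_some hf
    have : d.get? k = some q.2 := by
      rw [PySem.Dict.get?_eq_some_iff_mem_items d k q.2 hnd]
      rw [← hq1]
      exact hmem
    simp [this]

lemma get?_foldl_insert {κ ν : Type} [BEq κ] [LawfulBEq κ] (l : List (κ × ν))
    (hnd : (l.map Prod.fst).Nodup) (k : κ) :
    (l.foldl (fun d q => d.insert q.1 q.2) (PySem.Dict.empty : PySem.Dict κ ν)).get? k
      = (l.find? (fun q => q.1 == k)).map Prod.snd := by
  have hitems : (l.foldl (fun d q => d.insert q.1 q.2) (PySem.Dict.empty : PySem.Dict κ ν)).items = l := by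
    have := PySem.Dict.items_foldl_insert_fresh l Prod.fst Prod.snd PySem.Dict.empty
      (fun a _ => by simp [PySem.Dict.contains_empty]) hnd
    simpa using this
  have hkeys : (l.foldl (fun d q => d.insert q.1 q.2) (PySem.Dict.empty : PySem.Dict κ ν)).keys.Nodup := by
    show ((l.foldl (fun d q => d.insert q.1 q.2) (PySem.Dict.empty : PySem.Dict κ ν)).items.map Prod.fst).Nodup
    rw [hitems]; exact hnd
  rw [dict_get?_eq_find? _ hkeys, hitems]

lemma get?_ofList_nodup {κ ν : Type} [BEq κ] [LawfulBEq κ] (l : List (κ × ν))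
    (hnd : (l.map Prod.fst).Nodup) (k : κ) :
    (PySem.Dict.ofList l).get? k = (l.find? (fun q => q.1 == k)).map Prod.snd :=
  get?_foldl_insert l hnd k

lemma items_perm_of_get?_eq {κ ν : Type} [BEq κ] [LawfulBEq κ] [DecidableEq κ] [DecidableEq ν]
    (d d' : PySem.Dict κ ν) (h1 : d.keys.Nodup) (h2 : d'.keys.Nodup)
    (hg : ∀ k, d.get? k = d'.get? k) : d.items.Perm d'.items := by
  have hmem : ∀ (dd : PySem.Dict κ ν), dd.keys.Nodup → ∀ p : κ × ν, p ∈ dd.items ↔ dd.get? p.1 = some p.2 := by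
    intro dd hdd p
    rw [PySem.Dict.get?_eq_some_iff_mem_items dd p.1 p.2 hdd]
  have hn1 : d.items.Nodup := h1.of_map Prod.fst
  have hn2 : d'.items.Nodup := h2.of_map Prod.fst
  apply List.perm_of_nodup_nodup_toFinset_eq hn1 hn2
  ext p
  simp only [List.mem_toFinset]
  rw [hmem d h1 p, hmem d' h2 p, hg]

lemma filter_filterMap' {α β : Type} (l : List α) (f : α → Option β) (p : β → Bool) :
    (l.filterMap f).filter p
      = l.filterMap (fun x => (f x).bind (fun y => if p y then some y else none)) := by
  induction l with
  | nil => rfl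
  | cons x t ih =>
    simp only [List.filterMap_cons]
    cases hfx : f x with
    | none => simpa using ih
    | some y =>
      by_cases hp : p y <;> simp [hp, ih]

def stepA (dp : PySem.Dict (Option Int × Option Int) Int) (algs : List Int) :
    PySem.Dict (Option Int × Option Int) Int :=
  PySem.Dict.ofList
    (((dp.items.foldl (fun nxt it =>
        (PySem.List.pyRange 0 (algs.length : Int) 1).foldl (fun nxt c =>
          if it.1.1 == some c || it.1.2 == some c then nxt
          else nxt.modify (it.1.2, some c) [] (fun x => x ++ [it.2 + PySem.List.pyGetD algs c 0]))
          nxt)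
        (PySem.Dict.empty : PySem.Dict (Option Int × Option Int) (List Int)))).items.map
      (fun kv => (kv.1, pyMaxInt kv.2)))

lemma solve_eq_foldl (profits : List (List Int)) :
    solve profits
      = pyMaxInt ((profits.foldl stepA
          (PySem.Dict.ofList [(((none : Option Int), (none : Option Int)), (0 : Int))])).values) := rfl

def hA (algs : List Int) (it : (Option Int × Option Int) × Int) (c : Int) :
    Option ((Option Int × Option Int) × Int) :=
  if it.1.1 == some c || it.1.2 == some c then none
  else some ((it.1.2, some c), it.2 + PySem.List.pyGetD algs c 0)

def LA (items : List ((Option Int × Option Int) × Int)) (algs : List Int) :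
    List ((Option Int × Option Int) × Int) :=
  items.flatMap (fun it => (PySem.List.pyRange 0 (algs.length : Int) 1).filterMap (hA algs it))

lemma nxtA_eq (dp : PySem.Dict (Option Int × Option Int) Int) (algs : List Int) :
    (dp.items.foldl (fun nxt it =>
        (PySem.List.pyRange 0 (algs.length : Int) 1).foldl (fun nxt c =>
          if it.1.1 == some c || it.1.2 == some c then nxt
          else nxt.modify (it.1.2, some c) [] (fun x => x ++ [it.2 + PySem.List.pyGetD algs c 0]))
          nxt)
        (PySem.Dict.empty : PySem.Dict (Option Int × Option Int) (List Int)))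
    = (LA dp.items algs).foldl (fun d q => d.modify q.1 [] (fun x => x ++ [q.2]))
        (PySem.Dict.empty : PySem.Dict (Option Int × Option Int) (List Int)) := by
  unfold LA
  rw [← foldl_foldl_flatMap]
  apply PySem.List.foldl_congr_mem
  intro acc it _
  rw [← foldl_match_filterMap]
  congr 1
  funext nxt c
  by_cases hc : (it.1.1 == some c || it.1.2 == some c) <;> simp [hA, hc]

lemma get?_foldl_modify {κ : Type} [BEq κ] [LawfulBEq κ] [DecidableEq κ] {β : Type}
    (l : List (κ × β)) (k : κ) :
    (l.foldl (fun d q => d.modify q.1 [] (fun x => x ++ [q.2]))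
        (PySem.Dict.empty : PySem.Dict κ (List β))).get? k
      = (if l.filter (fun q => q.1 == k) = [] then none
         else some ((l.filter (fun q => q.1 == k)).map Prod.snd)) := by
  set D := l.foldl (fun d q => d.modify q.1 [] (fun x => x ++ [q.2]))
      (PySem.Dict.empty : PySem.Dict κ (List β)) with hD
  have hkeys : D.keys = PySem.Set.ofList (l.map Prod.fst) := by
    have := PySem.Dict.keys_foldl_modify_key l Prod.fst [] (fun d q => fun x => x ++ [q.2])
      PySem.Dict.empty
    simpa [PySem.Dict.keys_empty, PySem.Set.update_nil_left] using this
  have hgetD := PySem.Dict.getD_foldl_modify_append l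
    (PySem.Dict.empty : PySem.Dict κ (List β)) k
  by_cases hmem : k ∈ l.map Prod.fst
  · have hc : k ∈ D.keys := by rw [hkeys]; exact (PySem.Set.mem_ofList _ _).2 hmem
    have hne : D.get? k ≠ none := fun h =>
      ((PySem.Dict.get?_eq_none_iff_not_mem_keys D k).1 h) hc
    obtain ⟨v, hv⟩ := Option.ne_none_iff_exists'.mp hne
    have hvv : v = (l.filter (fun q => q.1 == k)).map Prod.snd := by
      have h2 : D.getD k [] = (l.filter (fun q => q.1 == k)).map Prod.snd := by
        rw [← hD] at hgetD
        simpa [PySem.Dict.getD_empty] using hgetD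
      rw [PySem.Dict.getD_eq_get?_getD, hv] at h2
      simpa using h2
    have hfil : ¬ l.filter (fun q => q.1 == k) = [] := by
      rcases List.mem_map.1 hmem with ⟨q, hq, rfl⟩
      intro hnil
      have : q ∈ l.filter (fun q' => q'.1 == q.1) := List.mem_filter.2 ⟨hq, by simp⟩
      rw [hnil] at this
      simp at this
    rw [hv, if_neg hfil, hvv]
  · have h0 : D.get? k = none := (PySem.Dict.get?_eq_none_iff_not_mem_keys D k).2
      (by rw [hkeys]; exact fun h => hmem ((PySem.Set.mem_ofList _ _).1 h))
    have hnil : l.filter (fun q => q.1 == k) = [] := List.filter_eq_nil_iff.2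
      (fun q hq hqk => hmem (List.mem_map.2 ⟨q, hq, by simpa using hqk⟩))
    rw [h0, if_pos hnil]

def entryVals (items : List ((Option Int × Option Int) × Int)) (b : Option Int) (c : Int) :
    List Int :=
  (items.filter (fun p => p.1.2 == b && p.1.1 != some c)).map Prod.snd

def nextOpt (items : List ((Option Int × Option Int) × Int)) (algs : List Int)
    (key : Option Int × Option Int) : Option Int :=
  match key.2 with
  | none => none
  | some c =>
    if 0 ≤ c ∧ c < (algs.length : Int) ∧ key.1 ≠ some c then
      (PySem.List.max? (entryVals items key.1 c) (fun y => y)).map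
        (fun m => m + PySem.List.pyGetD algs c 0)
    else none

lemma hA_some {algs : List Int} {it : (Option Int × Option Int) × Int} {c : Int}
    {q : (Option Int × Option Int) × Int} (h : hA algs it c = some q) :
    q = ((it.1.2, some c), it.2 + PySem.List.pyGetD algs c 0)
      ∧ (it.1.1 == some c || it.1.2 == some c) = false := by
  unfold hA at h
  by_cases hc : (it.1.1 == some c || it.1.2 == some c)
  · rw [if_pos hc] at h; exact absurd h (by simp)
  · rw [if_neg hc] at h
    exact ⟨(Option.some.inj h).symm, by simpa using hc⟩

lemma LA_filter (l : List ((Option Int × Option Int) × Int)) (algs : List Int)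
    (key : Option Int × Option Int) :
    (LA l algs).filter (fun q => q.1 == key)
      = match key.2 with
        | none => []
        | some C =>
            if 0 ≤ C ∧ C < (algs.length : Int) ∧ key.1 ≠ some C then
              (l.filter (fun it => it.1.2 == key.1 && it.1.1 != some C)).map
                (fun it => ((key.1, some C), it.2 + PySem.List.pyGetD algs C 0))
            else []
    := by
  obtain ⟨B, oc⟩ := key
  unfold LA
  rw [filter_flatMap']
  cases oc with
  | none =>
    simp only []
    apply List.flatMap_eq_nil_iff.2
    intro it _
    apply List.filter_eq_nil_iff.2
    intro q hq
    obtain ⟨c, _, hc⟩ := List.mem_filterMap.1 hq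
    have := (hA_some hc).1
    subst this
    simp
  | some C =>
    simp only []
    by_cases hr : 0 ≤ C ∧ C < (algs.length : Int)
    · have hinner : ∀ it : (Option Int × Option Int) × Int,
          ((PySem.List.pyRange 0 (algs.length : Int) 1).filterMap (hA algs it)).filter
              (fun q => q.1 == (B, some C))
            = if (!(B == some C) && it.1.2 == B && it.1.1 != some C) then
                [((B, some C), it.2 + PySem.List.pyGetD algs C 0)] else [] := by
        intro it
        rw [filter_filterMap']
        have hgc : ∀ x, ((hA algs it x).bind
            (fun y => if y.1 == (B, some C) then some y else none)) ≠ none → x = C := by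
          intro x hx
          cases hax : hA algs it x with
          | none => rw [hax] at hx; simp at hx
          | some q =>
            rw [hax] at hx
            have hq := (hA_some hax).1
            by_cases hqc : (q.1 == (B, some C))
            · rw [hq] at hqc
              simp only [beq_iff_eq, Prod.mk.injEq] at hqc
              exact Option.some.inj hqc.2
            · rw [Option.bind_some, if_neg hqc] at hx
              exact absurd rfl hx
        rw [filterMap_eq_single _ (PySem.List.nodup_pyRange_one 0 (algs.length : Int)) _ C hgc,
          if_pos (PySem.List.mem_pyRange_one.2 hr)]
        unfold hA
        by_cases hg : (it.1.1 == some C || it.1.2 == some C)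
        · rw [if_pos hg]
          have hfalse : (!(B == some C) && it.1.2 == B && it.1.1 != some C) = false := by
            rcases Bool.or_eq_true_iff.1 hg with h | h
            · simp [show it.1.1 = some C from by simpa using h]
            · have h2 : it.1.2 = some C := by simpa using h
              by_cases hB : (it.1.2 == B)
              · have hBC : B = some C := by
                  rw [← (show it.1.2 = B from by simpa using hB)]; exact h2
                simp [hBC]
              · simp [hB]
          rw [hfalse]
          rfl
        · rw [if_neg hg]
          rw [Option.bind_some]
          have hg' : ¬ (it.1.1 == some C) = true ∧ ¬ (it.1.2 == some C) = true := by
            constructor <;> (intro h; exact hg (Bool.or_eq_true_iff.2 (by first | exact Or.inl h | exact Or.inr h)))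
          have hg1 : ¬ (it.1.1 == some C) = true := fun h => hg (Bool.or_eq_true_iff.2 (Or.inl h))
          have hg2 : ¬ (it.1.2 == some C) = true := fun h => hg (Bool.or_eq_true_iff.2 (Or.inr h))
          by_cases hB : (it.1.2 == B)
          · have hB' : it.1.2 = B := by simpa using hB
            have hBC : (B == some C) = false := by
              rw [← hB']
              exact Bool.eq_false_iff.2 hg2
            have hkey : (((it.1.2, some C) : Option Int × Option Int) == (B, some C)) = true := by
              simp [hB']
            rw [if_pos hkey]
            have htrue : (!(B == some C) && it.1.2 == B && it.1.1 != some C) = true := by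
              simp only [hBC, hB, Bool.not_false, Bool.true_and, Bool.and_true, bne]
              simp [Bool.eq_false_iff.2 hg1]
            rw [htrue]
            simp [hB']
          · have hkey : (((it.1.2, some C) : Option Int × Option Int) == (B, some C)) = false := by
              apply Bool.eq_false_iff.2
              intro h
              simp only [beq_iff_eq, Prod.mk.injEq] at h
              exact (Bool.eq_false_iff.1 (Bool.eq_false_iff.2 hB)) (by simp [h.1])
            rw [hkey]
            have hfalse : (!(B == some C) && it.1.2 == B && it.1.1 != some C) = false := by
              simp [hB]
            rw [hfalse]
            rfl
      simp only [hinner]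
      rw [flatMap_if_singleton]
      by_cases hBC : B = some C
      · rw [if_neg (by tauto)]
        have hp : (fun it : (Option Int × Option Int) × Int =>
            (!(B == some C) && it.1.2 == B && it.1.1 != some C)) = fun _ => false := by
          funext it; simp [hBC]
        rw [hp, List.filter_false, List.map_nil]
      · rw [if_pos ⟨hr.1, hr.2, hBC⟩]
        congr 1
        apply List.filter_congr
        intro it _
        simp [show (B == some C) = false from Bool.eq_false_iff.2 (by simpa using hBC)]
    · have hempty : ∀ it : (Option Int × Option Int) × Int,
          ((PySem.List.pyRange 0 (algs.length : Int) 1).filterMap (hA algs it)).filter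
              (fun q => q.1 == (B, some C)) = [] := by
        intro it
        apply List.filter_eq_nil_iff.2
        intro q hq
        obtain ⟨c, hcmem, hc⟩ := List.mem_filterMap.1 hq
        have := (hA_some hc).1
        subst this
        intro hbeq
        simp only [beq_iff_eq, Prod.mk.injEq] at hbeq
        have : c = C := Option.some.inj hbeq.2
        subst this
        exact hr ⟨(PySem.List.mem_pyRange_one.1 hcmem).1, (PySem.List.mem_pyRange_one.1 hcmem).2⟩
      rw [if_neg (by tauto)]
      simp only [hempty]
      simp

lemma stepA_get? (dp : PySem.Dict (Option Int × Option Int) Int) (algs : List Int)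
    (key : Option Int × Option Int) :
    (stepA dp algs).get? key = nextOpt dp.items algs key := by
  unfold stepA
  rw [nxtA_eq]
  set N := (LA dp.items algs).foldl (fun d q => d.modify q.1 [] (fun x => x ++ [q.2]))
      (PySem.Dict.empty : PySem.Dict (Option Int × Option Int) (List Int)) with hN
  have hknd : N.keys.Nodup := by
    rw [hN]
    exact PySem.Dict.nodup_keys_foldl_modify_key (LA dp.items algs) Prod.fst []
      (fun d q => fun x => x ++ [q.2]) PySem.Dict.empty (by simp [PySem.Dict.keys_empty])
  have hmapnd : ((N.items.map (fun kv => (kv.1, pyMaxInt kv.2))).map Prod.fst).Nodup := by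
    have : (N.items.map (fun kv => (kv.1, pyMaxInt kv.2))).map Prod.fst = N.items.map Prod.fst := by
      simp [List.map_map, Function.comp]
    rw [this]
    exact hknd
  rw [get?_ofList_nodup _ hmapnd key, List.find?_map]
  have hcomp : ((fun q : (Option Int × Option Int) × Int => q.1 == key) ∘
      (fun kv : (Option Int × Option Int) × List Int => (kv.1, pyMaxInt kv.2)))
      = fun kv => kv.1 == key := rfl
  rw [hcomp]
  have hfind : N.get? key = (N.items.find? (fun kv => kv.1 == key)).map Prod.snd :=
    dict_get?_eq_find? N hknd key
  have hmod : N.get? key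
      = (if (LA dp.items algs).filter (fun q => q.1 == key) = [] then none
         else some (((LA dp.items algs).filter (fun q => q.1 == key)).map Prod.snd)) := by
    rw [hN]
    exact get?_foldl_modify (LA dp.items algs) key
  have hres : ((N.items.find? (fun kv => kv.1 == key)).map
        (fun kv : (Option Int × Option Int) × List Int => (kv.1, pyMaxInt kv.2))).map Prod.snd
      = (N.get? key).map pyMaxInt := by
    rw [hfind]
    cases N.items.find? (fun kv => kv.1 == key) <;> rfl
  rw [hres, hmod, LA_filter]
  unfold nextOpt
  obtain ⟨B, oc⟩ := key
  cases oc with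
  | none => rfl
  | some C =>
    simp only []
    by_cases hcond : 0 ≤ C ∧ C < (algs.length : Int) ∧ B ≠ some C
    · rw [if_pos hcond, if_pos hcond]
      set E := entryVals dp.items B C with hE
      have hmapE : ((dp.items.filter (fun it => it.1.2 == B && it.1.1 != some C)).map
            (fun it => (((B, some C) : Option Int × Option Int),
              it.2 + PySem.List.pyGetD algs C 0))).map Prod.snd
          = E.map (fun m => m + PySem.List.pyGetD algs C 0) := by
        rw [hE]
        unfold entryVals
        simp [List.map_map, Function.comp]
      by_cases hEnil : E = []
      · have : dp.items.filter (fun it => it.1.2 == B && it.1.1 != some C) = [] := by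
          have := hEnil
          rw [hE] at this
          unfold entryVals at this
          exact List.map_eq_nil_iff.1 this
        rw [if_pos (by rw [this]; rfl)]
        rw [hEnil]
        rfl
      · have hfilne : ¬ (dp.items.filter (fun it => it.1.2 == B && it.1.1 != some C)).map
            (fun it => (((B, some C) : Option Int × Option Int),
              it.2 + PySem.List.pyGetD algs C 0)) = [] := by
          intro h
          apply hEnil
          rw [hE]
          unfold entryVals
          rw [List.map_eq_nil_iff.1 h]
          rfl
        rw [if_neg hfilne]
        simp only [Option.map_some]
        rw [hmapE]
        unfold pyMaxInt
        rw [max?_map_add]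
        cases hmE : PySem.List.max? E (fun y => y) with
        | none => exact absurd ((PySem.List.max?_eq_none_iff _ _).1 hmE) hEnil
        | some m => rfl
    · rw [if_neg hcond, if_neg hcond]
      rfl

def bStep (best : PySem.Dict (Option Int) (Int × Option Int × Option Int))
    (it : (Option Int × Option Int) × Int) :
    PySem.Dict (Option Int) (Int × Option Int × Option Int) :=
  match best.get? it.1.2 with
  | none => best.insert it.1.2 (it.2, it.1.1, (none : Option Int))
  | some (v1, a1, v2) =>
    if v1 < it.2 then best.insert it.1.2 (it.2, it.1.1, some v1)
    else best.insert it.1.2 (v1, a1, some (match v2 with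
      | none => it.2
      | some w => if w < it.2 then it.2 else w))

def stepB (dp : PySem.Dict (Option Int × Option Int) Int) (algs : List Int) :
    PySem.Dict (Option Int × Option Int) Int :=
  ((dp.items.foldl bStep
      (PySem.Dict.empty : PySem.Dict (Option Int) (Int × Option Int × Option Int))).items).foldl
    (fun ndp bt =>
      (PySem.List.pyRange 0 (algs.length : Int) 1).foldl (fun ndp c =>
        if bt.1 == some c then ndp
        else if bt.2.2.1 == some c then
          match bt.2.2.2 with
          | some v2 => ndp.insert (bt.1, some c) (v2 + PySem.List.pyGetD algs c 0)
          | none => ndp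
        else ndp.insert (bt.1, some c) (bt.2.1 + PySem.List.pyGetD algs c 0))
        ndp)
    (PySem.Dict.empty : PySem.Dict (Option Int × Option Int) Int)

lemma solve_alt_eq_foldl (profits : List (List Int)) :
    solve_alt profits
      = pyMaxInt ((profits.foldl stepB
          (PySem.Dict.ofList [(((none : Option Int), (none : Option Int)), (0 : Int))])).values) := rfl

def upd (o : Option (Int × Option Int × Option Int)) (it : (Option Int × Option Int) × Int) :
    Int × Option Int × Option Int :=
  match o with
  | none => (it.2, it.1.1, none)
  | some (v1, a1, v2) =>
    if v1 < it.2 then (it.2, it.1.1, some v1)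
    else (v1, a1, some (match v2 with
      | none => it.2
      | some w => if w < it.2 then it.2 else w))

lemma bStep_eq (best : PySem.Dict (Option Int) (Int × Option Int × Option Int))
    (it : (Option Int × Option Int) × Int) :
    bStep best it = best.insert it.1.2 (upd (best.get? it.1.2) it) := by
  unfold bStep upd
  cases best.get? it.1.2 with
  | none => rfl
  | some t =>
    obtain ⟨v1, a1, v2⟩ := t
    by_cases h : v1 < it.2 <;> simp [h]

def entries (items : List ((Option Int × Option Int) × Int)) (b : Option Int) :
    List (Option Int × Int) :=
  (items.filter (fun p => p.1.2 == b)).map (fun p => (p.1.1, p.2))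

def BestSpec (es : List (Option Int × Int)) :
    Option (Int × Option Int × Option Int) → Prop
  | none => es = []
  | some t => (t.2.1, t.1) ∈ es ∧ (∀ e ∈ es, e.2 ≤ t.1) ∧
      t.2.2 = PySem.List.max? ((es.filter (fun e => e.1 != t.2.1)).map Prod.snd) (fun y => y)

lemma entryVals_eq (items : List ((Option Int × Option Int) × Int)) (b : Option Int) (c : Int) :
    entryVals items b c
      = ((entries items b).filter (fun e => e.1 != some c)).map Prod.snd := by
  unfold entryVals entries
  rw [List.filter_map, List.map_map]
  congr 1
  rw [List.filter_filter]
  apply List.filter_congr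
  intro p _
  simp [Function.comp, Bool.and_comm]

lemma entries_append (l : List ((Option Int × Option Int) × Int))
    (it : (Option Int × Option Int) × Int) (b : Option Int) :
    entries (l ++ [it]) b
      = entries l b ++ (if it.1.2 == b then [(it.1.1, it.2)] else []) := by
  unfold entries
  rw [List.filter_append]
  by_cases h : (it.1.2 == b) <;> simp [h]

lemma mem_entries_fst (l : List ((Option Int × Option Int) × Int)) (b : Option Int)
    (a : Option Int) (v : Int) (h : (a, v) ∈ entries l b) : (a, b) ∈ l.map Prod.fst := by
  unfold entries at h
  obtain ⟨p, hp, he⟩ := List.mem_map.1 h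
  have hpf := List.mem_filter.1 hp
  have hb : p.1.2 = b := by simpa using hpf.2
  have ha : p.1.1 = a := congrArg Prod.fst he
  exact List.mem_map.2 ⟨p, hpf.1, by rw [← hb, ← ha]⟩

lemma bestFold_spec (l : List ((Option Int × Option Int) × Int)) (b : Option Int)
    (hnd : (l.map Prod.fst).Nodup) :
    BestSpec (entries l b)
      ((l.foldl bStep
        (PySem.Dict.empty : PySem.Dict (Option Int) (Int × Option Int × Option Int))).get? b) := by
  induction l using List.reverseRecOn with
  | nil =>
    rw [List.foldl_nil, PySem.Dict.get?_empty]
    show entries [] b = []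
    rfl
  | append_singleton l it ih =>
    rw [List.map_append] at hnd
    have hndl : (l.map Prod.fst).Nodup := (List.nodup_append.1 hnd).1
    have hfresh : it.1 ∉ l.map Prod.fst := by
      intro hmem
      exact (List.nodup_append.1 hnd).2.2 it.1 hmem it.1 (by simp) rfl
    have IH := ih hndl
    rw [List.foldl_append, List.foldl_cons, List.foldl_nil, bStep_eq, entries_append]
    by_cases hb : (it.1.2 == b)
    · have hb' : it.1.2 = b := by simpa using hb
      rw [if_pos hb, hb', PySem.Dict.get?_insert_self]
      have hfresh' : ∀ (a : Option Int) (v : Int), (a, v) ∈ entries l b → a ≠ it.1.1 := by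
        intro a v hav heq
        apply hfresh
        have h2 := mem_entries_fst l b a v hav
        rw [heq, ← hb'] at h2
        simpa using h2
      cases ho : (l.foldl bStep
          (PySem.Dict.empty : PySem.Dict (Option Int) (Int × Option Int × Option Int))).get? b with
      | none =>
        rw [ho] at IH
        have hes : entries l b = [] := IH
        rw [show upd none it = (it.2, it.1.1, (none : Option Int)) from rfl, hes]
        refine ⟨by simp, ?_, ?_⟩
        · intro e he
          simp only [List.nil_append, List.mem_singleton] at he
          rw [he]
        · rw [show (((([] : List (Option Int × Int))
              ++ [((it.1.1 : Option Int), it.2)]).filter (fun e => e.1 != it.1.1))) = [] from by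
            simp]
          rfl
      | some t =>
        obtain ⟨v1, a1, v2⟩ := t
        rw [ho] at IH
        obtain ⟨hmem, hbound, hv2⟩ := IH
        have hmem' : ((a1 : Option Int), v1) ∈ entries l b := hmem
        have hbound' : ∀ e ∈ entries l b, e.2 ≤ v1 := hbound
        have hv2' : v2 = PySem.List.max?
            (((entries l b).filter (fun e => e.1 != a1)).map Prod.snd) (fun y => y) := hv2
        by_cases hlt : v1 < it.2
        · rw [show upd (some (v1, a1, v2)) it = (it.2, it.1.1, some v1) from by
            simp only [upd]; rw [if_pos hlt]]
          refine ⟨by simp, ?_, ?_⟩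
          · intro e he
            rcases List.mem_append.1 he with h | h
            · exact le_trans (hbound' e h) (le_of_lt hlt)
            · simp only [List.mem_singleton] at h
              rw [h]
          · show some v1 = _
            rw [List.filter_append]
            have h1 : ([((it.1.1 : Option Int), it.2)].filter (fun e => e.1 != it.1.1)) = [] := by
              simp
            rw [h1, List.append_nil]
            have h2 : (entries l b).filter (fun e => e.1 != it.1.1) = entries l b := by
              apply List.filter_eq_self.2
              intro e he
              have : e.1 ≠ it.1.1 := by
                obtain ⟨ea, ev⟩ := e
                exact hfresh' ea ev he
              simpa using this
            rw [h2]
            symm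
            apply max?_id_eq_some
            · exact List.mem_map.2 ⟨(a1, v1), hmem', rfl⟩
            · intro y hy
              obtain ⟨e, he, rfl⟩ := List.mem_map.1 hy
              exact hbound' e he
        · have hle : it.2 ≤ v1 := not_lt.1 hlt
          have ha1ne : (it.1.1 : Option Int) ≠ a1 := fun heq => hfresh' a1 v1 hmem' heq.symm
          have hfil : ((entries l b ++ [((it.1.1 : Option Int), it.2)]).filter
                (fun e => e.1 != a1)).map Prod.snd
              = ((entries l b).filter (fun e => e.1 != a1)).map Prod.snd ++ [it.2] := by
            rw [List.filter_append]
            rw [show ([((it.1.1 : Option Int), it.2)].filter (fun e => e.1 != a1))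
                = [((it.1.1 : Option Int), it.2)] from by simp [ha1ne]]
            rw [List.map_append]
            rfl
          cases v2 with
          | none =>
            have hv2n : (none : Option Int) = PySem.List.max?
                (((entries l b).filter (fun e => e.1 != a1)).map Prod.snd) (fun y => y) := hv2'
            rw [show upd (some (v1, a1, none)) it = (v1, a1, some it.2) from by
              simp only [upd]; rw [if_neg hlt]]
            refine ⟨List.mem_append.2 (Or.inl hmem'), ?_, ?_⟩
            · intro e he
              rcases List.mem_append.1 he with h | h
              · exact hbound' e h
              · simp only [List.mem_singleton] at h
                rw [h]
                exact hle
            · show some it.2 = _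
              rw [hfil, max?_id_append_singleton, ← hv2n]
          | some w =>
            have hv2s : (some w : Option Int) = PySem.List.max?
                (((entries l b).filter (fun e => e.1 != a1)).map Prod.snd) (fun y => y) := hv2'
            rw [show upd (some (v1, a1, some w)) it
                = (v1, a1, some (if w < it.2 then it.2 else w)) from by
              simp only [upd]; rw [if_neg hlt]]
            refine ⟨List.mem_append.2 (Or.inl hmem'), ?_, ?_⟩
            · intro e he
              rcases List.mem_append.1 he with h | h
              · exact hbound' e h
              · simp only [List.mem_singleton] at h
                rw [h]
                exact hle
            · show some (if w < it.2 then it.2 else w) = _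
              rw [hfil, max?_id_append_singleton, ← hv2s]
              congr 1
              rcases lt_or_ge w it.2 with h | h
              · rw [if_pos h]
                exact (max_eq_right (le_of_lt h)).symm
              · rw [if_neg (not_lt.2 h)]
                exact (max_eq_left h).symm
    · rw [if_neg hb, List.append_nil]
      have hbne : b ≠ it.1.2 := by
        intro h
        exact hb (by simp [h])
      rw [PySem.Dict.get?_insert_of_ne _ _ hbne]
      exact ih hndl

def hB (algs : List Int) (bt : Option Int × (Int × Option Int × Option Int)) (c : Int) :
    Option ((Option Int × Option Int) × Int) :=
  if bt.1 == some c then none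
  else if bt.2.2.1 == some c then
    (bt.2.2.2).map (fun v2 => ((bt.1, some c), v2 + PySem.List.pyGetD algs c 0))
  else some ((bt.1, some c), bt.2.1 + PySem.List.pyGetD algs c 0)

def LB (bitems : List (Option Int × (Int × Option Int × Option Int))) (algs : List Int) :
    List ((Option Int × Option Int) × Int) :=
  bitems.flatMap (fun bt => (PySem.List.pyRange 0 (algs.length : Int) 1).filterMap (hB algs bt))

lemma hB_some {algs : List Int} {bt : Option Int × (Int × Option Int × Option Int)} {c : Int}
    {q : (Option Int × Option Int) × Int} (h : hB algs bt c = some q) : q.1 = (bt.1, some c) := by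
  unfold hB at h
  by_cases h1 : (bt.1 == some c)
  · rw [if_pos h1] at h; exact absurd h (by simp)
  · rw [if_neg h1] at h
    by_cases h2 : (bt.2.2.1 == some c)
    · rw [if_pos h2] at h
      obtain ⟨v2, _, hv⟩ := Option.map_eq_some_iff.1 h
      rw [← hv]
    · rw [if_neg h2] at h
      rw [← Option.some.inj h]

lemma nxtB_eq (bitems : List (Option Int × (Int × Option Int × Option Int))) (algs : List Int) :
    (bitems.foldl (fun ndp bt =>
        (PySem.List.pyRange 0 (algs.length : Int) 1).foldl (fun ndp c =>
          if bt.1 == some c then ndp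
          else if bt.2.2.1 == some c then
            match bt.2.2.2 with
            | some v2 => ndp.insert (bt.1, some c) (v2 + PySem.List.pyGetD algs c 0)
            | none => ndp
          else ndp.insert (bt.1, some c) (bt.2.1 + PySem.List.pyGetD algs c 0))
          ndp)
      (PySem.Dict.empty : PySem.Dict (Option Int × Option Int) Int))
    = (LB bitems algs).foldl (fun d q => d.insert q.1 q.2)
        (PySem.Dict.empty : PySem.Dict (Option Int × Option Int) Int) := by
  unfold LB
  rw [← foldl_foldl_flatMap]
  apply PySem.List.foldl_congr_mem
  intro acc bt _
  rw [← foldl_match_filterMap]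
  congr 1
  funext ndp c
  by_cases h1 : (bt.1 == some c)
  · simp [hB, h1]
  · by_cases h2 : (bt.2.2.1 == some c)
    · cases hv : bt.2.2.2 with
      | none => simp [hB, h1, h2, hv]
      | some v2 => simp [hB, h1, h2, hv]
    · simp [hB, h1, h2]

lemma LB_fst_nodup (bitems : List (Option Int × (Int × Option Int × Option Int)))
    (algs : List Int) (hnd : (bitems.map Prod.fst).Nodup) :
    ((LB bitems algs).map Prod.fst).Nodup := by
  unfold LB
  induction bitems with
  | nil => simp
  | cons bt rest ih =>
    rw [List.map_cons, List.nodup_cons] at hnd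
    rw [List.flatMap_cons, List.map_append]
    apply List.Nodup.append
    · rw [List.map_filterMap]
      apply List.Nodup.filterMap ?_ (PySem.List.nodup_pyRange_one 0 (algs.length : Int))
      intro a a' k hk hk'
      obtain ⟨q, hq, hqk⟩ := Option.map_eq_some_iff.1 hk
      obtain ⟨q', hq', hqk'⟩ := Option.map_eq_some_iff.1 hk'
      have e1 := hB_some hq
      have e2 := hB_some hq'
      rw [hqk] at e1
      rw [hqk'] at e2
      rw [e1] at e2
      have : (some a : Option Int) = some a' := congrArg Prod.snd e2
      exact Option.some.inj this
    · exact ih hnd.2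
    · intro x hx hx'
      rw [List.map_filterMap] at hx
      obtain ⟨c, _, hc⟩ := List.mem_filterMap.1 hx
      obtain ⟨q, hq, hqk⟩ := Option.map_eq_some_iff.1 hc
      have hx1 : x.1 = bt.1 := by rw [← hqk, hB_some hq]
      rw [List.map_flatMap] at hx'
      obtain ⟨bt', hbt', hxin⟩ := List.mem_flatMap.1 hx'
      obtain ⟨c', _, hc'⟩ := List.mem_filterMap.1 (by
        rw [List.map_filterMap] at hxin
        exact hxin)
      obtain ⟨q', hq', hqk'⟩ := Option.map_eq_some_iff.1 hc'
      have hx1' : x.1 = bt'.1 := by rw [← hqk', hB_some hq']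
      apply hnd.1
      rw [show bt.1 = bt'.1 from by rw [← hx1, hx1']]
      exact List.mem_map.2 ⟨bt', hbt', rfl⟩

lemma eq_of_mem_fst_nodup {α β : Type} (l : List (α × β)) (hnd : (l.map Prod.fst).Nodup)
    {q q' : α × β} (hq : q ∈ l) (hq' : q' ∈ l) (h : q.1 = q'.1) : q = q' := by
  induction l with
  | nil => simp at hq
  | cons x t ih =>
    rw [List.map_cons, List.nodup_cons] at hnd
    rcases List.mem_cons.1 hq with rfl | hq2 <;> rcases List.mem_cons.1 hq' with rfl | hq2'
    · rfl
    · exact absurd (List.mem_map.2 ⟨q', hq2', h.symm⟩) hnd.1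
    · exact absurd (List.mem_map.2 ⟨q, hq2, h⟩) hnd.1
    · exact ih hnd.2 hq2 hq2'

lemma find?_eq_of_mem_fst_nodup {α β : Type} [BEq α] [LawfulBEq α] (l : List (α × β))
    (hnd : (l.map Prod.fst).Nodup) {k : α} {v : β} (hmem : (k, v) ∈ l) :
    l.find? (fun q => q.1 == k) = some (k, v) := by
  cases hf : l.find? (fun q => q.1 == k) with
  | none =>
    rw [List.find?_eq_none] at hf
    exact absurd (by simp : (((k, v) : α × β).1 == k) = true) (hf _ hmem)
  | some q =>
    have hqk : q.1 = k := by simpa using List.find?_some hf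
    have hqm : q ∈ l := List.mem_of_find?_eq_some hf
    rw [eq_of_mem_fst_nodup l hnd hqm hmem (by rw [hqk])]

lemma stepB_get? (dp : PySem.Dict (Option Int × Option Int) Int) (algs : List Int)
    (hnd : dp.keys.Nodup) (key : Option Int × Option Int) :
    (stepB dp algs).get? key = nextOpt dp.items algs key := by
  have hndi : (dp.items.map Prod.fst).Nodup := hnd
  unfold stepB
  rw [nxtB_eq]
  set best := dp.items.foldl bStep
      (PySem.Dict.empty : PySem.Dict (Option Int) (Int × Option Int × Option Int)) with hbest
  have hbkeys : best.keys.Nodup := by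
    rw [hbest]
    have hfun : dp.items.foldl bStep
          (PySem.Dict.empty : PySem.Dict (Option Int) (Int × Option Int × Option Int))
        = dp.items.foldl (fun d it => d.insert it.1.2 (upd (d.get? it.1.2) it))
            PySem.Dict.empty :=
      PySem.List.foldl_congr_mem _ _ _ _ (fun acc it _ => bStep_eq acc it)
    rw [hfun]
    exact PySem.Dict.nodup_keys_foldl_insert_key dp.items (fun it => it.1.2)
      (fun d it => upd (d.get? it.1.2) it) PySem.Dict.empty (by simp [PySem.Dict.keys_empty])
  have hbk : (best.items.map Prod.fst).Nodup := hbkeys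
  have hspec : ∀ b, BestSpec (entries dp.items b) (best.get? b) := fun b =>
    bestFold_spec dp.items b hndi
  have hLBnd := LB_fst_nodup best.items algs hbk
  rw [get?_foldl_insert _ hLBnd key]
  have memLB : ∀ q, q ∈ LB best.items algs
      ↔ ∃ bt ∈ best.items, ∃ c, c ∈ PySem.List.pyRange 0 (algs.length : Int) 1
          ∧ hB algs bt c = some q := by
    intro q
    constructor
    · intro h
      obtain ⟨bt, hbt, hq⟩ := List.mem_flatMap.1 h
      obtain ⟨c, hc, hcq⟩ := List.mem_filterMap.1 hq
      exact ⟨bt, hbt, c, hc, hcq⟩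
    · rintro ⟨bt, hbt, c, hc, hcq⟩
      exact List.mem_flatMap.2 ⟨bt, hbt, List.mem_filterMap.2 ⟨c, hc, hcq⟩⟩
  obtain ⟨B, oc⟩ := key
  cases oc with
  | none =>
    rw [show (LB best.items algs).find? (fun q => q.1 == (B, (none : Option Int))) = none from by
      apply List.find?_eq_none.2
      intro q hq
      obtain ⟨bt, _, c, _, hcq⟩ := (memLB q).1 hq
      rw [hB_some hcq]
      simp]
    rfl
  | some C =>
    show _ = nextOpt dp.items algs (B, some C)
    rw [show nextOpt dp.items algs (B, some C)
        = (if 0 ≤ C ∧ C < (algs.length : Int) ∧ B ≠ some C then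
            (PySem.List.max? (entryVals dp.items B C) (fun y => y)).map
              (fun m => m + PySem.List.pyGetD algs C 0)
          else none) from rfl]
    by_cases hcond : 0 ≤ C ∧ C < (algs.length : Int) ∧ B ≠ some C
    · rw [if_pos hcond]
      cases hE : PySem.List.max? (entryVals dp.items B C) (fun y => y) with
      | some m =>
        have hBC : (B == some C) = false := by
          apply Bool.eq_false_iff.2
          simpa using hcond.2.2
        cases hgB : best.get? B with
        | none =>
          have hes : entries dp.items B = [] := by
            have h := hspec B
            rw [hgB] at h
            exact h
          have hEnil : entryVals dp.items B C = [] := by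
            rw [entryVals_eq, hes]
            rfl
          have hn : PySem.List.max? (entryVals dp.items B C) (fun y => y) = none :=
            (PySem.List.max?_eq_none_iff _ _).2 hEnil
          rw [hn] at hE
          exact absurd hE (by simp)
        | some t =>
          obtain ⟨v1, a1, v2⟩ := t
          have hsp := hspec B
          rw [hgB] at hsp
          obtain ⟨hmem, hbound, hv2⟩ := hsp
          have hmem' : ((a1 : Option Int), v1) ∈ entries dp.items B := hmem
          have hbound' : ∀ e ∈ entries dp.items B, e.2 ≤ v1 := hbound
          have hv2' : v2 = PySem.List.max?
              (((entries dp.items B).filter (fun e => e.1 != a1)).map Prod.snd) (fun y => y) := hv2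
          have hbtmem : ((B, (v1, a1, v2)) :
                Option Int × (Int × Option Int × Option Int)) ∈ best.items :=
            (PySem.Dict.get?_eq_some_iff_mem_items best B (v1, a1, v2) hbkeys).1 hgB
          have hCmem : C ∈ PySem.List.pyRange 0 (algs.length : Int) 1 :=
            PySem.List.mem_pyRange_one.2 ⟨hcond.1, hcond.2.1⟩
          have hq : hB algs (B, (v1, a1, v2)) C
              = some ((B, some C), m + PySem.List.pyGetD algs C 0) := by
            unfold hB
            rw [if_neg (show ¬ ((B == some C) = true) from by simp [hBC])]
            by_cases ha1 : ((((B, (v1, a1, v2)) :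
                Option Int × (Int × Option Int × Option Int)).2.2.1 == some C) = true)
            · rw [if_pos ha1]
              have ha1' : a1 = some C := by simpa using ha1
              have hv2m : v2 = some m := by
                rw [hv2', ha1', ← entryVals_eq, hE]
              show v2.map _ = _
              rw [hv2m]
              rfl
            · rw [if_neg ha1]
              have ha1' : a1 ≠ some C := by simpa using ha1
              have hv1m : m = v1 := by
                have hmax : PySem.List.max? (entryVals dp.items B C) (fun y => y) = some v1 := by
                  apply max?_id_eq_some
                  · rw [entryVals_eq]
                    exact List.mem_map.2 ⟨(a1, v1),
                      List.mem_filter.2 ⟨hmem', by simpa using ha1'⟩, rfl⟩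
                  · intro y hy
                    rw [entryVals_eq] at hy
                    obtain ⟨e, he, rfl⟩ := List.mem_map.1 hy
                    exact hbound' e (List.mem_filter.1 he).1
                rw [hE] at hmax
                exact Option.some.inj hmax
              rw [hv1m]
          have hmemLB : ((B, some C), m + PySem.List.pyGetD algs C 0) ∈ LB best.items algs :=
            (memLB _).2 ⟨(B, (v1, a1, v2)), hbtmem, C, hCmem, hq⟩
          rw [find?_eq_of_mem_fst_nodup _ hLBnd hmemLB]
          rfl
      | none =>
        have hEnil : entryVals dp.items B C = [] := (PySem.List.max?_eq_none_iff _ _).1 hE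
        rw [show (LB best.items algs).find? (fun q => q.1 == (B, some C)) = none from by
          apply List.find?_eq_none.2
          intro q hqLB
          obtain ⟨bt, hbt, c, hc, hcq⟩ := (memLB q).1 hqLB
          rw [hB_some hcq]
          simp only [beq_iff_eq, Prod.mk.injEq, Option.some.injEq]
          rintro ⟨hbt1, hcC⟩
          subst hcC
          have hg : best.get? B = some bt.2 := by
            rw [← hbt1]
            exact PySem.Dict.get?_of_mem_items best (by simpa using hbt) hbkeys
          have hsp := hspec B
          rw [hg] at hsp
          obtain ⟨hmem, hbound, hv2⟩ := hsp
          have hall : ∀ e ∈ entries dp.items B, e.1 = some c := by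
            intro e he
            by_contra hne
            have hmem2 : e.2 ∈ entryVals dp.items B c := by
              rw [entryVals_eq]
              exact List.mem_map.2 ⟨e, List.mem_filter.2 ⟨he, by simpa using hne⟩, rfl⟩
            rw [hEnil] at hmem2
            simp at hmem2
          have ha1C : bt.2.2.1 = some c := hall _ hmem
          have hv2n : bt.2.2.2 = none := by
            rw [hv2]
            apply (PySem.List.max?_eq_none_iff _ _).2
            rw [show ((entries dp.items B).filter (fun e => e.1 != bt.2.2.1)) = [] from
              List.filter_eq_nil_iff.2 (fun e he => by simp [hall e he, ha1C])]
            rfl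
          unfold hB at hcq
          rw [if_neg (show ¬ ((bt.1 == some c) = true) from by
              rw [hbt1]; simpa using hcond.2.2), if_pos (by simp [ha1C]), hv2n] at hcq
          exact absurd hcq (by simp)]
        rfl
    · rw [if_neg hcond]
      rw [show (LB best.items algs).find? (fun q => q.1 == (B, some C)) = none from by
        apply List.find?_eq_none.2
        intro q hqLB
        obtain ⟨bt, hbt, c, hc, hcq⟩ := (memLB q).1 hqLB
        rw [hB_some hcq]
        simp only [beq_iff_eq, Prod.mk.injEq, Option.some.injEq]
        rintro ⟨hbt1, hcC⟩
        subst hcC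
        have h1 := PySem.List.mem_pyRange_one.1 hc
        have hguard : ¬ ((bt.1 == some c) = true) := by
          intro h
          unfold hB at hcq
          rw [if_pos h] at hcq
          exact absurd hcq (by simp)
        apply hcond
        refine ⟨h1.1, h1.2, ?_⟩
        rw [← hbt1]
        simpa using hguard]
      rfl

lemma stepA_keys_nodup (dp : PySem.Dict (Option Int × Option Int) Int) (algs : List Int) :
    (stepA dp algs).keys.Nodup := by
  unfold stepA
  exact PySem.Dict.nodup_keys_ofList _

lemma stepB_keys_nodup (dp : PySem.Dict (Option Int × Option Int) Int) (algs : List Int) :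
    (stepB dp algs).keys.Nodup := by
  unfold stepB
  rw [nxtB_eq]
  exact PySem.Dict.nodup_keys_foldl_insert_key _ Prod.fst (fun _ q => q.2)
    PySem.Dict.empty (by simp [PySem.Dict.keys_empty])

lemma nextOpt_perm (items1 items2 : List ((Option Int × Option Int) × Int)) (algs : List Int)
    (h : items1.Perm items2) (key : Option Int × Option Int) :
    nextOpt items1 algs key = nextOpt items2 algs key := by
  obtain ⟨B, oc⟩ := key
  cases oc with
  | none => rfl
  | some c =>
    show (if _ then (PySem.List.max? (entryVals items1 B c) (fun y => y)).map _ else none)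
      = (if _ then (PySem.List.max? (entryVals items2 B c) (fun y => y)).map _ else none)
    have hp : (entryVals items1 B c).Perm (entryVals items2 B c) := (h.filter _).map _
    rw [max?_id_perm hp]

def DRel (d d' : PySem.Dict (Option Int × Option Int) Int) : Prop :=
  d.keys.Nodup ∧ d'.keys.Nodup ∧ d.items.Perm d'.items

lemma step_rel (d d' : PySem.Dict (Option Int × Option Int) Int) (algs : List Int)
    (h : DRel d d') : DRel (stepA d algs) (stepB d' algs) := by
  obtain ⟨h1, h2, hp⟩ := h
  refine ⟨stepA_keys_nodup d algs, stepB_keys_nodup d' algs, ?_⟩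
  apply items_perm_of_get?_eq _ _ (stepA_keys_nodup d algs) (stepB_keys_nodup d' algs)
  intro k
  rw [stepA_get?, stepB_get? d' algs h2 k]
  exact nextOpt_perm d.items d'.items algs hp k

lemma foldl_rel (profits : List (List Int)) (d d' : PySem.Dict (Option Int × Option Int) Int)
    (h : DRel d d') : DRel (profits.foldl stepA d) (profits.foldl stepB d') := by
  induction profits generalizing d d' with
  | nil => exact h
  | cons algs rest ih => exact ih _ _ (step_rel d d' algs h)

-- ===== VERDICT (by name: the statement is the Claim_ definition above) =====
theorem solve_spec : Claim_equal_solve := by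
  unfold Claim_equal_solve
  intro profits _ _
  unfold Spec_solve
  rw [solve_eq_foldl, solve_alt_eq_foldl]
  obtain ⟨_, _, hp⟩ := foldl_rel profits
    (PySem.Dict.ofList [(((none : Option Int), (none : Option Int)), (0 : Int))])
    (PySem.Dict.ofList [(((none : Option Int), (none : Option Int)), (0 : Int))])
    ⟨PySem.Dict.nodup_keys_ofList _, PySem.Dict.nodup_keys_ofList _, List.Perm.refl _⟩
  unfold pyMaxInt
  have hv : ((profits.foldl stepA
        (PySem.Dict.ofList [(((none : Option Int), (none : Option Int)), (0 : Int))])).values).Perm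
      ((profits.foldl stepB
        (PySem.Dict.ofList [(((none : Option Int), (none : Option Int)), (0 : Int))])).values) :=
    hp.map _
  rw [max?_id_perm hv]
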